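-- pv_equiv track=rewrite | github.com/zhangyialn/graduation-project | backend/controllers/translateController.py | _build_address_text_nominatim
-- ===== SOURCE A (Python) =====
-- def _build_address_text_nominatim(address=None):
--     """将 Nominatim 结构化地址拼为可读中文文本。"""
--     payload = address or {}
--     province = payload.get('state') or payload.get('province') or ''
--     city = payload.get('city') or payload.get('town') or payload.get('county') or payload.get('state_district') or ''
--     district = payload.get('city_district') or payload.get('suburb') or payload.get('borough') or payload.get('quarter') or ''
--     road = payload.get('road') or payload.get('pedestrian') or payload.get('residential') or payload.get('neighbourhood') or ''
--     number = payload.get('house_number') or ''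
--     return ''.join([part for part in [province, city, district, road, number] if part])
-- ===== SOURCE B (Python) =====
-- _SLOT = {
--     'state': (0, 0), 'province': (0, 1),
--     'city': (1, 0), 'town': (1, 1), 'county': (1, 2), 'state_district': (1, 3),
--     'city_district': (2, 0), 'suburb': (2, 1), 'borough': (2, 2), 'quarter': (2, 3),
--     'road': (3, 0), 'pedestrian': (3, 1), 'residential': (3, 2), 'neighbourhood': (3, 3),
--     'house_number': (4, 0),
-- }
--
--
-- def _build_address_text_nominatim(address=None):
--     """将 Nominatim 结构化地址拼为可读中文文本。"""
--     best = {}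
--     for key, value in (address or {}).items():
--         info = _SLOT.get(key)
--         if info and value:
--             slot, rank = info
--             cur = best.get(slot)
--             if cur is None or rank < cur[0]:
--                 best[slot] = (rank, value)
--     return ''.join(best[i][1] for i in range(5) if i in best)
-- ===== Notes on version B (the rewrite author's own statement) =====
-- stated objective: alternative
-- what changed: Instead of A's fifteen chained per-key dict lookups (five or-chains), B makes a single pass over the address entries, classifying each key through a precomputed key-to-(slot,rank) index and keeping the best-ranked truthy value per output slot, then joins the five slots in order.
import Mathlib
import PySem

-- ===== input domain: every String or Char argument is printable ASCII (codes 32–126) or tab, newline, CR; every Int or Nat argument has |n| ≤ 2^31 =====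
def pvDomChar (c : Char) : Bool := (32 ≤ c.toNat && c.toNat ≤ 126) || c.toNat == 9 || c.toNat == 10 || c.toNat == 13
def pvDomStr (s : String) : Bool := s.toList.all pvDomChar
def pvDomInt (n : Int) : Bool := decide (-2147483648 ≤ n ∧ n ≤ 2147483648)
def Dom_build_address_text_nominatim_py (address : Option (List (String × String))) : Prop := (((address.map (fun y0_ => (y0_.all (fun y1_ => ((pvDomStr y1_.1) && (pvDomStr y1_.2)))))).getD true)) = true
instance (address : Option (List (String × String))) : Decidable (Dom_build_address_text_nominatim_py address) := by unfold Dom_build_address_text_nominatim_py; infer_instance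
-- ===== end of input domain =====

-- B replaces A's fifteen chained per-key lookups by ONE pass over the address entries,
-- classifying each key through a precomputed key→(slot,rank) index and keeping the
-- best-ranked value per slot (objective: alternative algorithm / data structure).

-- ===== PORT A =====
-- A-side helper: Python's `x or y` on an Optional[str] left operand (None and '' are falsy)
def pvOrS (a : Option String) (b : String) : String :=
  match a with
  | some v => if v ≠ "" then v else b
  | none => b

def build_address_text_nominatim_py (address : Option (List (String × String))) : String :=
  let payload : PySem.Dict String String := PySem.Dict.mk (address.getD [])
  let province := pvOrS (payload.get? "state") (pvOrS (payload.get? "province") "")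
  let city := pvOrS (payload.get? "city") (pvOrS (payload.get? "town") (pvOrS (payload.get? "county") (pvOrS (payload.get? "state_district") "")))
  let district := pvOrS (payload.get? "city_district") (pvOrS (payload.get? "suburb") (pvOrS (payload.get? "borough") (pvOrS (payload.get? "quarter") "")))
  let road := pvOrS (payload.get? "road") (pvOrS (payload.get? "pedestrian") (pvOrS (payload.get? "residential") (pvOrS (payload.get? "neighbourhood") "")))
  let number := pvOrS (payload.get? "house_number") ""
  PySem.Str.join "" (([province, city, district, road, number]).filter (fun part => decide (part ≠ "")))

-- ===== PORT B =====
-- the _SLOT index of Source B: key → (slot, rank)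
def pvSlotTable : List (String × (Int × Int)) :=
  [("state", (0, 0)), ("province", (0, 1)),
   ("city", (1, 0)), ("town", (1, 1)), ("county", (1, 2)), ("state_district", (1, 3)),
   ("city_district", (2, 0)), ("suburb", (2, 1)), ("borough", (2, 2)), ("quarter", (2, 3)),
   ("road", (3, 0)), ("pedestrian", (3, 1)), ("residential", (3, 2)), ("neighbourhood", (3, 3)),
   ("house_number", (4, 0))]

def pvSlotDict : PySem.Dict String (Int × Int) := PySem.Dict.mk pvSlotTable

-- one iteration of Source B's loop body
def pvStepB (best : PySem.Dict Int (Int × String)) (kv : String × String) : PySem.Dict Int (Int × String) :=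
  match pvSlotDict.get? kv.1 with
  | some info =>
    if kv.2 ≠ "" then
      match best.get? info.1 with
      | none => best.insert info.1 (info.2, kv.2)
      | some cur => if info.2 < cur.1 then best.insert info.1 (info.2, kv.2) else best
    else best
  | none => best

def build_address_text_nominatim_py_alt (address : Option (List (String × String))) : String :=
  let best := (address.getD []).foldl pvStepB (PySem.Dict.empty : PySem.Dict Int (Int × String))
  PySem.Str.join "" ((PySem.List.pyRange 0 5 1).filterMap (fun i => (best.get? i).map (fun q => q.2)))

-- ===== PRECONDITION & SPEC =====
-- Pre_ excludes association lists with duplicate keys: they cannot arise from an actual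
-- Python dict (A's argument type), and on them the assoc-list lookup order is accidental.
def Pre_build_address_text_nominatim_py (address : Option (List (String × String))) : Prop :=
  ((address.getD []).map Prod.fst).Nodup
instance (address : Option (List (String × String))) : Decidable (Pre_build_address_text_nominatim_py address) := by unfold Pre_build_address_text_nominatim_py; infer_instance

def pvWitness_build_address_text_nominatim_py : (Option (List (String × String))) :=
  (some [("city", "Beijing"), ("road", "Chang'an Ave"), ("house_number", "1")])

def Spec_build_address_text_nominatim_py (address : Option (List (String × String))) (out : String) : Prop := out = build_address_text_nominatim_py_alt address
instance (address : Option (List (String × String))) (out : String) : Decidable (Spec_build_address_text_nominatim_py address out) := by unfold Spec_build_address_text_nominatim_py; infer_instance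

-- ===== CLAIM (what is proved, stated in full; the proofs are below) =====
def Claim_equal_build_address_text_nominatim_py : Prop := ∀ (address : Option (List (String × String))), Dom_build_address_text_nominatim_py address → Pre_build_address_text_nominatim_py address → Spec_build_address_text_nominatim_py address (build_address_text_nominatim_py address)

-- ===== LEMMAS AND PROOFS =====

-- the ranked candidate-key group of each output slot (proof-side description of A's or-chains)
def pvRGroup (s : Int) : List (Int × String) :=
  if s = 0 then [(0, "state"), (1, "province")]
  else if s = 1 then [(0, "city"), (1, "town"), (2, "county"), (3, "state_district")]
  else if s = 2 then [(0, "city_district"), (1, "suburb"), (2, "borough"), (3, "quarter")]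
  else if s = 3 then [(0, "road"), (1, "pedestrian"), (2, "residential"), (3, "neighbourhood")]
  else if s = 4 then [(0, "house_number")]
  else []

def pvTval (o : Option String) : Option String :=
  match o with
  | none => none
  | some v => if v = "" then none else some v

-- first truthy candidate of a ranked group, with its rank
def pvChainO (f : String → Option String) : List (Int × String) → Option (Int × String)
  | [] => none
  | (r, k) :: rest =>
    match pvTval (f k) with
    | some v => some (r, v)
    | none => pvChainO f rest

-- A's or-chain over a plain key list
def pvOrList (f : String → Option String) : List String → String
  | [] => ""
  | k :: rest => pvOrS (f k) (pvOrList f rest)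

-- left-biased min-by-rank
def pvMerge (c b : Option (Int × String)) : Option (Int × String) :=
  match b with
  | none => c
  | some q =>
    match c with
    | none => some q
    | some p => if q.1 < p.1 then some q else some p

-- Source B's loop body restricted to one slot s
def pvStepS (s : Int) (c : Option (Int × String)) (kv : String × String) : Option (Int × String) :=
  match pvSlotDict.get? kv.1 with
  | some info =>
    if kv.2 ≠ "" then
      if info.1 = s then
        match c with
        | none => some (info.2, kv.2)
        | some cur => if info.2 < cur.1 then some (info.2, kv.2) else some cur
      else c
    else c
  | none => c

theorem pvMerge_none_left (b : Option (Int × String)) : pvMerge none b = b := by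
  cases b <;> rfl

theorem pvMerge_assoc (a b c : Option (Int × String)) :
    pvMerge (pvMerge a b) c = pvMerge a (pvMerge b c) := by
  cases c with
  | none => rfl
  | some qc =>
    cases b with
    | none => rfl
    | some qb =>
      cases a with
      | none => simp only [pvMerge]; split_ifs <;> first | rfl | (exfalso; omega)
      | some qa =>
        obtain ⟨ra, va⟩ := qa
        obtain ⟨rb, vb⟩ := qb
        obtain ⟨rc, vc⟩ := qc
        simp only [pvMerge]
        by_cases h1 : rb < ra <;> by_cases h2 : rc < rb <;> by_cases h3 : rc < ra <;>
          simp [h1, h2, h3] <;> omega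

theorem pvStepS_merge (s : Int) (c : Option (Int × String)) (kv : String × String) :
    pvStepS s c kv = pvMerge c (pvStepS s none kv) := by
  unfold pvStepS
  cases h : pvSlotDict.get? kv.1 with
  | none => cases c <;> rfl
  | some info =>
    by_cases hv : kv.2 = ""
    · simp only [hv, ne_eq, not_true_eq_false, if_false]; cases c <;> rfl
    · by_cases hsi : info.1 = s
      · simp only [hv, ne_eq, not_false_eq_true, if_true, hsi, if_pos rfl]
        cases c <;> rfl
      · simp only [hv, ne_eq, not_false_eq_true, if_true, if_neg hsi]
        cases c <;> rfl

theorem pvFoldS_merge (s : Int) (L : List (String × String)) :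
    ∀ c, L.foldl (pvStepS s) c = pvMerge c (L.foldl (pvStepS s) none) := by
  induction L with
  | nil => intro c; cases c <;> rfl
  | cons kv R ih =>
    intro c
    simp only [List.foldl_cons]
    rw [ih (pvStepS s c kv), ih (pvStepS s none kv),
        pvStepS_merge s c kv, pvMerge_assoc]

theorem pvFoldB_get (s : Int) (L : List (String × String)) :
    ∀ d : PySem.Dict Int (Int × String),
      (L.foldl pvStepB d).get? s = L.foldl (pvStepS s) (d.get? s) := by
  induction L with
  | nil => intro d; rfl
  | cons kv R ih =>
    intro d
    simp only [List.foldl_cons]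
    rw [ih]
    congr 1
    unfold pvStepB pvStepS
    cases h : pvSlotDict.get? kv.1 with
    | none => rfl
    | some info =>
      by_cases hv : kv.2 = ""
      · simp [hv]
      · simp only [hv, ne_eq, not_false_eq_true, if_true]
        by_cases hsi : info.1 = s
        · subst hsi
          rw [if_pos rfl]
          cases hc : d.get? info.1 with
          | none => simp [hc, PySem.Dict.get?_insert]
          | some cur =>
            simp only [hc]
            by_cases hlt : info.2 < cur.1
            · simp only [if_pos hlt]
              rw [PySem.Dict.get?_insert, if_pos rfl]
            · simp only [if_neg hlt]
              exact hc
        · rw [if_neg hsi]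
          have hne : ¬ s = info.1 := fun hh => hsi hh.symm
          cases hc2 : d.get? info.1 with
          | none =>
            simp only [hc2]
            rw [PySem.Dict.get?_insert, if_neg hne]
          | some cur =>
            simp only [hc2]
            by_cases hlt : info.2 < cur.1
            · simp only [if_pos hlt]
              rw [PySem.Dict.get?_insert, if_neg hne]
            · simp only [if_neg hlt]

theorem pvChain_congr (f : String → Option String) (k v : String)
    (g : List (Int × String)) (h : ∀ p ∈ g, p.2 ≠ k) :
    pvChainO (fun x => if k = x then some v else f x) g = pvChainO f g := by
  induction g with
  | nil => rfl
  | cons p rest ih =>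
    obtain ⟨r', k'⟩ := p
    have hk : ¬ k = k' := fun hh => (h (r', k') (by simp)) hh.symm
    simp only [pvChainO, if_neg hk]
    cases ht : pvTval (f k') with
    | some w => simp [ht]
    | none =>
      simp only [ht]
      exact ih (fun p hp => h p (by simp [hp]))

theorem pvChain_none (f : String → Option String) (hf : ∀ x, f x = none)
    (g : List (Int × String)) : pvChainO f g = none := by
  induction g with
  | nil => rfl
  | cons p rest ih => obtain ⟨r, k⟩ := p; simp [pvChainO, hf k, pvTval, ih]

theorem pvChain_rank (f : String → Option String) (g : List (Int × String))
    (q : Int × String) (h : pvChainO f g = some q) : ∃ p ∈ g, p.1 = q.1 := by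
  induction g with
  | nil => simp [pvChainO] at h
  | cons p rest ih =>
    obtain ⟨r, k⟩ := p
    simp only [pvChainO] at h
    cases ht : pvTval (f k) with
    | some w => rw [ht] at h; exact ⟨(r, k), by simp, by cases h; rfl⟩
    | none =>
      rw [ht] at h
      obtain ⟨p, hp, he⟩ := ih h
      exact ⟨p, by simp [hp], he⟩

theorem pvChain_sound (f : String → Option String) (g : List (Int × String))
    (q : Int × String) (h : pvChainO f g = some q) : q.2 ≠ "" := by
  induction g with
  | nil => simp [pvChainO] at h
  | cons p rest ih =>
    obtain ⟨r, k⟩ := p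
    simp only [pvChainO] at h
    cases ht : pvTval (f k) with
    | some w =>
      rw [ht] at h
      have hq : q = (r, w) := (Option.some.inj h).symm
      subst hq
      show w ≠ ""
      cases hf : f k
      · rw [hf] at ht; simp [pvTval] at ht
      · rw [hf] at ht
        simp only [pvTval] at ht
        split_ifs at ht with hu
        all_goals first
          | exact hu
          | (injection ht with h2; exact h2 ▸ hu)
    | none => rw [ht] at h; exact ih h

-- the string value of a ranked-chain result
def pvStrv (c : Option (Int × String)) : String :=
  match c with
  | none => ""
  | some q => q.2

-- A's or-chain over the key list equals the value of the ranked chain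
theorem pvOrList_chain (f : String → Option String) (g : List (Int × String)) :
    pvOrList f (g.map Prod.snd) = pvStrv (pvChainO f g) := by
  induction g with
  | nil => rfl
  | cons p rest ih =>
    obtain ⟨r, k⟩ := p
    simp only [List.map_cons, pvOrList, pvChainO]
    cases hf : f k with
    | none => simp [pvOrS, pvTval, pvStrv, ih]
    | some w =>
      by_cases hw : w = ""
      · simp [pvOrS, pvTval, pvStrv, hf, hw, ih]
      · simp [pvOrS, pvTval, pvStrv, hf, hw]

theorem pvChain_update (f : String → Option String) (k v : String) (r : Int) :
    ∀ (pre post : List (Int × String)),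
      (∀ p ∈ pre, p.2 ≠ k ∧ p.1 < r) → (∀ p ∈ post, p.2 ≠ k ∧ r < p.1) → f k = none →
      pvChainO (fun x => if k = x then some v else f x) (pre ++ (r, k) :: post)
        = pvMerge (if v = "" then none else some (r, v)) (pvChainO f (pre ++ (r, k) :: post)) := by
  intro pre
  induction pre with
  | nil =>
    intro post _ hpost hfk
    have hcongr := pvChain_congr f k v post (fun p hp => (hpost p hp).1)
    simp only [List.nil_append, pvChainO]
    rw [if_pos trivial, hfk]
    simp only [pvTval]
    by_cases hv : v = ""
    · rw [if_pos hv, if_pos hv, pvMerge_none_left]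
      exact hcongr
    · rw [if_neg hv, if_neg hv]
      cases hq : pvChainO f post with
      | none => rfl
      | some q =>
        obtain ⟨p, hp, he⟩ := pvChain_rank f post q hq
        have hlt : r < q.1 := he ▸ (hpost p hp).2
        have hnl : ¬ q.1 < r := by omega
        simp [pvMerge, hnl]
  | cons p pre' ih =>
    intro post hpre hpost hfk
    obtain ⟨r', k'⟩ := p
    have hk : ¬ k = k' := fun hh => ((hpre (r', k') (by simp)).1) hh.symm
    have hr' : r' < r := (hpre (r', k') (by simp)).2
    simp only [List.cons_append, pvChainO, if_neg hk]
    cases ht : pvTval (f k') with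
    | none =>
      simp only [ht]
      exact ih post (fun p hp => hpre p (by simp [hp])) hpost hfk
    | some w =>
      simp only [ht]
      by_cases hv : v = ""
      · rw [if_pos hv, pvMerge_none_left]
      · rw [if_neg hv]
        simp [pvMerge, hr']

theorem pvNotInGroups (k : String) (h : pvSlotDict.get? k = none) :
    ∀ s : Int, ∀ p ∈ pvRGroup s, p.2 ≠ k := by
  intro s p hp heq
  rw [← heq] at h
  unfold pvRGroup at hp
  split_ifs at hp <;> (try (fin_cases hp <;> exact absurd h (by decide))) <;> (try cases hp)

theorem pvOther_of (k : String) (slot : Int)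
    (h : ∀ s ∈ ([0, 1, 2, 3, 4] : List Int), s ≠ slot → ∀ p ∈ pvRGroup s, p.2 ≠ k) :
    ∀ s : Int, s ≠ slot → ∀ p ∈ pvRGroup s, p.2 ≠ k := by
  intro s hs p hp
  by_cases h0 : s = 0
  · subst h0; exact h 0 (by simp) hs p hp
  by_cases h1 : s = 1
  · subst h1; exact h 1 (by simp) hs p hp
  by_cases h2 : s = 2
  · subst h2; exact h 2 (by simp) hs p hp
  by_cases h3 : s = 3
  · subst h3; exact h 3 (by simp) hs p hp
  by_cases h4 : s = 4
  · subst h4; exact h 4 (by simp) hs p hp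
  exfalso
  unfold pvRGroup at hp
  rw [if_neg h0, if_neg h1, if_neg h2, if_neg h3, if_neg h4] at hp
  exact absurd hp (List.not_mem_nil)

theorem pvPerKey (k : String) (slot rank : Int) (pre post : List (Int × String))
    (hsplit : pvRGroup slot = pre ++ (rank, k) :: post)
    (h1 : ∀ p ∈ pre, p.2 ≠ k ∧ p.1 < rank) (h2 : ∀ p ∈ post, p.2 ≠ k ∧ rank < p.1)
    (hOther : ∀ s : Int, s ≠ slot → ∀ p ∈ pvRGroup s, p.2 ≠ k)
    (hKey : pvSlotDict.get? k = some (slot, rank))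
    (f : String → Option String) (hfk : f k = none) (v : String) (s : Int) :
    pvChainO (fun x => if k = x then some v else f x) (pvRGroup s)
      = pvMerge (pvStepS s none (k, v)) (pvChainO f (pvRGroup s)) := by
  have hKey' : pvSlotDict.get? ((k, v) : String × String).1 = some (slot, rank) := hKey
  by_cases hs : s = slot
  · subst hs
    have hstep : pvStepS s none (k, v) = if v = "" then none else some (rank, v) := by
      unfold pvStepS
      rw [hKey']
      by_cases hv : v = ""
      · simp [hv]
      · simp [hv]
    rw [hstep, hsplit]
    exact pvChain_update f k v rank pre post h1 h2 hfk
  · have hss : ¬ slot = s := fun hh => hs hh.symm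
    have hstep : pvStepS s none (k, v) = none := by
      unfold pvStepS
      rw [hKey']
      by_cases hv : v = ""
      · simp [hv]
      · simp [hv, hss]
    rw [hstep, pvMerge_none_left]
    exact pvChain_congr f k v (pvRGroup s) (hOther s hs)

set_option maxHeartbeats 2000000 in
theorem pvConsStep (k v : String) (f : String → Option String) (hfk : f k = none) (s : Int) :
    pvChainO (fun x => if k = x then some v else f x) (pvRGroup s)
      = pvMerge (pvStepS s none (k, v)) (pvChainO f (pvRGroup s)) := by
  cases h : pvSlotDict.get? k with
  | none =>
    have hstep : pvStepS s none (k, v) = none := by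
      have h' : pvSlotDict.get? ((k, v) : String × String).1 = none := h
      unfold pvStepS
      rw [h']
    rw [hstep, pvMerge_none_left]
    exact pvChain_congr f k v (pvRGroup s) (pvNotInGroups k h s)
  | some info =>
    rw [show pvSlotDict = PySem.Dict.mk pvSlotTable from rfl, pvSlotTable] at h
    simp only [PySem.Dict.get?_mk_cons] at h
    by_cases c1 : ("state" == k) = true
    · rw [if_pos c1] at h
      obtain rfl : ("state" : String) = k := eq_of_beq c1
      have hinfo : info = ((0 : Int), (0 : Int)) := by cases h; rfl
      subst hinfo
      exact pvPerKey "state" 0 0 [] [(1, "province")] (by decide) (by decide)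
        (by decide) (pvOther_of "state" 0 (by decide)) (by decide) f hfk v s
    · rw [if_neg c1] at h
      by_cases c2 : ("province" == k) = true
      · rw [if_pos c2] at h
        obtain rfl : ("province" : String) = k := eq_of_beq c2
        have hinfo : info = ((0 : Int), (1 : Int)) := by cases h; rfl
        subst hinfo
        exact pvPerKey "province" 0 1 [(0, "state")] [] (by decide) (by decide)
          (by decide) (pvOther_of "province" 0 (by decide)) (by decide) f hfk v s
      · rw [if_neg c2] at h
        by_cases c3 : ("city" == k) = true
        · rw [if_pos c3] at h
          obtain rfl : ("city" : String) = k := eq_of_beq c3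
          have hinfo : info = ((1 : Int), (0 : Int)) := by cases h; rfl
          subst hinfo
          exact pvPerKey "city" 1 0 [] [(1, "town"), (2, "county"), (3, "state_district")] (by decide) (by decide)
            (by decide) (pvOther_of "city" 1 (by decide)) (by decide) f hfk v s
        · rw [if_neg c3] at h
          by_cases c4 : ("town" == k) = true
          · rw [if_pos c4] at h
            obtain rfl : ("town" : String) = k := eq_of_beq c4
            have hinfo : info = ((1 : Int), (1 : Int)) := by cases h; rfl
            subst hinfo
            exact pvPerKey "town" 1 1 [(0, "city")] [(2, "county"), (3, "state_district")] (by decide) (by decide)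
              (by decide) (pvOther_of "town" 1 (by decide)) (by decide) f hfk v s
          · rw [if_neg c4] at h
            by_cases c5 : ("county" == k) = true
            · rw [if_pos c5] at h
              obtain rfl : ("county" : String) = k := eq_of_beq c5
              have hinfo : info = ((1 : Int), (2 : Int)) := by cases h; rfl
              subst hinfo
              exact pvPerKey "county" 1 2 [(0, "city"), (1, "town")] [(3, "state_district")] (by decide) (by decide)
                (by decide) (pvOther_of "county" 1 (by decide)) (by decide) f hfk v s
            · rw [if_neg c5] at h
              by_cases c6 : ("state_district" == k) = true
              · rw [if_pos c6] at h
                obtain rfl : ("state_district" : String) = k := eq_of_beq c6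
                have hinfo : info = ((1 : Int), (3 : Int)) := by cases h; rfl
                subst hinfo
                exact pvPerKey "state_district" 1 3 [(0, "city"), (1, "town"), (2, "county")] [] (by decide) (by decide)
                  (by decide) (pvOther_of "state_district" 1 (by decide)) (by decide) f hfk v s
              · rw [if_neg c6] at h
                by_cases c7 : ("city_district" == k) = true
                · rw [if_pos c7] at h
                  obtain rfl : ("city_district" : String) = k := eq_of_beq c7
                  have hinfo : info = ((2 : Int), (0 : Int)) := by cases h; rfl
                  subst hinfo
                  exact pvPerKey "city_district" 2 0 [] [(1, "suburb"), (2, "borough"), (3, "quarter")] (by decide) (by decide)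
                    (by decide) (pvOther_of "city_district" 2 (by decide)) (by decide) f hfk v s
                · rw [if_neg c7] at h
                  by_cases c8 : ("suburb" == k) = true
                  · rw [if_pos c8] at h
                    obtain rfl : ("suburb" : String) = k := eq_of_beq c8
                    have hinfo : info = ((2 : Int), (1 : Int)) := by cases h; rfl
                    subst hinfo
                    exact pvPerKey "suburb" 2 1 [(0, "city_district")] [(2, "borough"), (3, "quarter")] (by decide) (by decide)
                      (by decide) (pvOther_of "suburb" 2 (by decide)) (by decide) f hfk v s
                  · rw [if_neg c8] at h
                    by_cases c9 : ("borough" == k) = true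
                    · rw [if_pos c9] at h
                      obtain rfl : ("borough" : String) = k := eq_of_beq c9
                      have hinfo : info = ((2 : Int), (2 : Int)) := by cases h; rfl
                      subst hinfo
                      exact pvPerKey "borough" 2 2 [(0, "city_district"), (1, "suburb")] [(3, "quarter")] (by decide) (by decide)
                        (by decide) (pvOther_of "borough" 2 (by decide)) (by decide) f hfk v s
                    · rw [if_neg c9] at h
                      by_cases c10 : ("quarter" == k) = true
                      · rw [if_pos c10] at h
                        obtain rfl : ("quarter" : String) = k := eq_of_beq c10
                        have hinfo : info = ((2 : Int), (3 : Int)) := by cases h; rfl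
                        subst hinfo
                        exact pvPerKey "quarter" 2 3 [(0, "city_district"), (1, "suburb"), (2, "borough")] [] (by decide) (by decide)
                          (by decide) (pvOther_of "quarter" 2 (by decide)) (by decide) f hfk v s
                      · rw [if_neg c10] at h
                        by_cases c11 : ("road" == k) = true
                        · rw [if_pos c11] at h
                          obtain rfl : ("road" : String) = k := eq_of_beq c11
                          have hinfo : info = ((3 : Int), (0 : Int)) := by cases h; rfl
                          subst hinfo
                          exact pvPerKey "road" 3 0 [] [(1, "pedestrian"), (2, "residential"), (3, "neighbourhood")] (by decide) (by decide)
                            (by decide) (pvOther_of "road" 3 (by decide)) (by decide) f hfk v s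
                        · rw [if_neg c11] at h
                          by_cases c12 : ("pedestrian" == k) = true
                          · rw [if_pos c12] at h
                            obtain rfl : ("pedestrian" : String) = k := eq_of_beq c12
                            have hinfo : info = ((3 : Int), (1 : Int)) := by cases h; rfl
                            subst hinfo
                            exact pvPerKey "pedestrian" 3 1 [(0, "road")] [(2, "residential"), (3, "neighbourhood")] (by decide) (by decide)
                              (by decide) (pvOther_of "pedestrian" 3 (by decide)) (by decide) f hfk v s
                          · rw [if_neg c12] at h
                            by_cases c13 : ("residential" == k) = true
                            · rw [if_pos c13] at h
                              obtain rfl : ("residential" : String) = k := eq_of_beq c13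
                              have hinfo : info = ((3 : Int), (2 : Int)) := by cases h; rfl
                              subst hinfo
                              exact pvPerKey "residential" 3 2 [(0, "road"), (1, "pedestrian")] [(3, "neighbourhood")] (by decide) (by decide)
                                (by decide) (pvOther_of "residential" 3 (by decide)) (by decide) f hfk v s
                            · rw [if_neg c13] at h
                              by_cases c14 : ("neighbourhood" == k) = true
                              · rw [if_pos c14] at h
                                obtain rfl : ("neighbourhood" : String) = k := eq_of_beq c14
                                have hinfo : info = ((3 : Int), (3 : Int)) := by cases h; rfl
                                subst hinfo
                                exact pvPerKey "neighbourhood" 3 3 [(0, "road"), (1, "pedestrian"), (2, "residential")] [] (by decide) (by decide)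
                                  (by decide) (pvOther_of "neighbourhood" 3 (by decide)) (by decide) f hfk v s
                              · rw [if_neg c14] at h
                                by_cases c15 : ("house_number" == k) = true
                                · rw [if_pos c15] at h
                                  obtain rfl : ("house_number" : String) = k := eq_of_beq c15
                                  have hinfo : info = ((4 : Int), (0 : Int)) := by cases h; rfl
                                  subst hinfo
                                  exact pvPerKey "house_number" 4 0 [] [] (by decide) (by decide)
                                    (by decide) (pvOther_of "house_number" 4 (by decide)) (by decide) f hfk v s
                                · rw [if_neg c15] at h
                                  rw [show (PySem.Dict.mk ([] : List (String × (Int × Int)))).get? k = none from rfl] at h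
                                  cases h

theorem pvFoldS_eq_chain (L : List (String × String)) (hnd : (L.map Prod.fst).Nodup) (s : Int) :
    L.foldl (pvStepS s) none = pvChainO (fun x => (PySem.Dict.mk L).get? x) (pvRGroup s) := by
  induction L with
  | nil =>
    rw [pvChain_none]
    · rfl
    · intro x; rfl
  | cons kv R ih =>
    obtain ⟨k, v⟩ := kv
    simp only [List.map_cons, List.nodup_cons] at hnd
    obtain ⟨hkR, hnd'⟩ := hnd
    have hfk : (PySem.Dict.mk R).get? k = none := by
      rw [PySem.Dict.get?_eq_none_iff_not_mem_keys]
      simpa [PySem.Dict.keys] using hkR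
    have hfun : (fun x => (PySem.Dict.mk ((k, v) :: R)).get? x)
        = fun x => if k = x then some v else (PySem.Dict.mk R).get? x := by
      funext x
      rw [PySem.Dict.get?_mk_cons]
      by_cases hx : k = x
      · rw [if_pos ((beq_iff_eq).mpr hx), if_pos hx]
      · rw [if_neg (by simpa using hx), if_neg hx]
    rw [hfun, pvConsStep k v _ hfk s, List.foldl_cons,
        pvFoldS_merge s R (pvStepS s none (k, v)), ih hnd']

theorem pvFF (cs : List (Option (Int × String)))
    (h : ∀ c ∈ cs, ∀ q, c = some q → q.2 ≠ "") :
    (cs.map pvStrv).filter (fun part => decide (part ≠ ""))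
      = cs.filterMap (fun c => c.map (fun q => q.2)) := by
  induction cs with
  | nil => rfl
  | cons c rest ih =>
    have ih' := ih (fun c hc => h c (by simp [hc]))
    cases c with
    | none =>
      rw [List.map_cons, List.filterMap_cons, List.filter_cons,
          if_neg (by simp [pvStrv])]
      exact ih'
    | some q =>
      have hq : q.2 ≠ "" := h (some q) (by simp) q rfl
      rw [List.map_cons, List.filterMap_cons, List.filter_cons,
          if_pos (by simp [pvStrv, hq])]
      exact congrArg (pvStrv (some q) :: ·) ih' 

-- ===== VERDICT (by name: the statement is the Claim_ definition above) =====
theorem build_address_text_nominatim_py_spec : Claim_equal_build_address_text_nominatim_py := by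
  intro address _ hpre
  show build_address_text_nominatim_py address = build_address_text_nominatim_py_alt address
  have hnd : ((address.getD []).map Prod.fst).Nodup := hpre
  have hget : ∀ s : Int,
      ((address.getD []).foldl pvStepB (PySem.Dict.empty : PySem.Dict Int (Int × String))).get? s
        = pvChainO (fun x => (PySem.Dict.mk (address.getD [])).get? x) (pvRGroup s) := by
    intro s
    rw [pvFoldB_get,
        show (PySem.Dict.empty : PySem.Dict Int (Int × String)).get? s = none from rfl]
    exact pvFoldS_eq_chain _ hnd s
  have hAeq : build_address_text_nominatim_py address =
      PySem.Str.join ""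
        (([pvOrList (fun x => (PySem.Dict.mk (address.getD [])).get? x) ["state", "province"],
           pvOrList (fun x => (PySem.Dict.mk (address.getD [])).get? x) ["city", "town", "county", "state_district"],
           pvOrList (fun x => (PySem.Dict.mk (address.getD [])).get? x) ["city_district", "suburb", "borough", "quarter"],
           pvOrList (fun x => (PySem.Dict.mk (address.getD [])).get? x) ["road", "pedestrian", "residential", "neighbourhood"],
           pvOrList (fun x => (PySem.Dict.mk (address.getD [])).get? x) ["house_number"]]).filter
          (fun part => decide (part ≠ ""))) := rfl
  have hBeq : build_address_text_nominatim_py_alt address =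
      PySem.Str.join ""
        (([0, 1, 2, 3, 4] : List Int).filterMap
          (fun i => (((address.getD []).foldl pvStepB (PySem.Dict.empty : PySem.Dict Int (Int × String))).get? i).map (fun q => q.2))) := by
    unfold build_address_text_nominatim_py_alt
    rw [show PySem.List.pyRange 0 5 1 = ([0, 1, 2, 3, 4] : List Int) from by decide]
  rw [hAeq, hBeq]
  have hA0 := pvOrList_chain (fun x => (PySem.Dict.mk (address.getD [])).get? x) (pvRGroup 0)
  have hA1 := pvOrList_chain (fun x => (PySem.Dict.mk (address.getD [])).get? x) (pvRGroup 1)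
  have hA2 := pvOrList_chain (fun x => (PySem.Dict.mk (address.getD [])).get? x) (pvRGroup 2)
  have hA3 := pvOrList_chain (fun x => (PySem.Dict.mk (address.getD [])).get? x) (pvRGroup 3)
  have hA4 := pvOrList_chain (fun x => (PySem.Dict.mk (address.getD [])).get? x) (pvRGroup 4)
  rw [show ((pvRGroup 0).map Prod.snd) = ["state", "province"] from rfl] at hA0
  rw [show ((pvRGroup 1).map Prod.snd) = ["city", "town", "county", "state_district"] from rfl] at hA1
  rw [show ((pvRGroup 2).map Prod.snd) = ["city_district", "suburb", "borough", "quarter"] from rfl] at hA2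
  rw [show ((pvRGroup 3).map Prod.snd) = ["road", "pedestrian", "residential", "neighbourhood"] from rfl] at hA3
  rw [show ((pvRGroup 4).map Prod.snd) = ["house_number"] from rfl] at hA4
  rw [hA0, hA1, hA2, hA3, hA4]
  have hfun2 : (fun i => (((address.getD []).foldl pvStepB (PySem.Dict.empty : PySem.Dict Int (Int × String))).get? i).map (fun q => q.2))
      = fun i => (pvChainO (fun x => (PySem.Dict.mk (address.getD [])).get? x) (pvRGroup i)).map (fun q => q.2) := by
    funext i; rw [hget i]
  rw [hfun2]
  rw [show ((fun i => (pvChainO (fun x => (PySem.Dict.mk (address.getD [])).get? x) (pvRGroup i)).map (fun q => q.2)))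
      = ((fun c : Option (Int × String) => c.map (fun q => q.2)) ∘ (fun i : Int => pvChainO (fun x => (PySem.Dict.mk (address.getD [])).get? x) (pvRGroup i))) from rfl]
  rw [← List.filterMap_map]
  rw [show (([0, 1, 2, 3, 4] : List Int).map (fun i => pvChainO (fun x => (PySem.Dict.mk (address.getD [])).get? x) (pvRGroup i)))
      = [pvChainO (fun x => (PySem.Dict.mk (address.getD [])).get? x) (pvRGroup 0),
         pvChainO (fun x => (PySem.Dict.mk (address.getD [])).get? x) (pvRGroup 1),
         pvChainO (fun x => (PySem.Dict.mk (address.getD [])).get? x) (pvRGroup 2),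
         pvChainO (fun x => (PySem.Dict.mk (address.getD [])).get? x) (pvRGroup 3),
         pvChainO (fun x => (PySem.Dict.mk (address.getD [])).get? x) (pvRGroup 4)] from rfl]
  rw [← pvFF _ (by
    intro c hc q hq
    simp only [List.mem_cons, List.not_mem_nil, or_false] at hc
    rcases hc with rfl | rfl | rfl | rfl | rfl <;>
      exact pvChain_sound _ _ q hq)]
  rfl
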